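-- pv_equiv track=rewrite | github.com/22bee123/thesis-api-roboflow | app.py | calculate_water_level
-- ===== SOURCE A (Python) =====
-- def calculate_water_level(detected_labels):
--     """Calculate water level based on detected/missing labels."""
--     detected_lower = [label.lower() for label in detected_labels]
--
--     green_visible = any('green' in label for label in detected_lower)
--     yellow_visible = any('yellow' in label for label in detected_lower)
--     orange_visible = any('orange' in label for label in detected_lower)
--     red_visible = any('red' in label for label in detected_lower)
--
--     water_level = 0
--     if not green_visible:
--         water_level = 25
--     if not yellow_visible and not green_visible:
--         water_level = 50
--     if not orange_visible and not yellow_visible and not green_visible: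
--         water_level = 75
--     if not red_visible and not orange_visible and not yellow_visible and not green_visible:
--         water_level = 100
--
--     return water_level
-- ===== SOURCE B (Python) =====
-- def calculate_water_level(detected_labels):
--     """Calculate water level based on detected/missing labels."""
--     colors = ('green', 'yellow', 'orange', 'red')
--     best = 4  # index of the highest-priority color seen so far (4 = none seen)
--     for label in detected_labels:
--         low = label.lower()
--         for i in range(best):
--             if colors[i] in low:
--                 best = i
--                 break
--     return 25 * best
-- ===== Notes on version B (the rewrite author's own statement) =====
-- stated objective: alternative
-- what changed: Single pass over the labels maintaining a min-priority-index accumulator (with a search window that narrows as better colors are found), instead of four separate any-scans over the labels plus cascading conditional assignments; result is 25 * final index.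
import Mathlib
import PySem

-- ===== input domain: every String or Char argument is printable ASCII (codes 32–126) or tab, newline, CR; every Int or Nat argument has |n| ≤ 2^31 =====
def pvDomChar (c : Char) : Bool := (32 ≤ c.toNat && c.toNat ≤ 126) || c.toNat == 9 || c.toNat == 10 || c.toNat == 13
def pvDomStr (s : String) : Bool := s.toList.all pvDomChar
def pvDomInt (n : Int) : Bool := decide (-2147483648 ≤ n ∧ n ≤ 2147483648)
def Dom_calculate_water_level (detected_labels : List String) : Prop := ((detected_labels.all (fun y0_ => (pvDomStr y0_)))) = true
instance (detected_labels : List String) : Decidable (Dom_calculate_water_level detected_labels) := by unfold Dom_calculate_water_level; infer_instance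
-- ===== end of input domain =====

-- B makes a single pass over the labels keeping a min-priority-index accumulator (narrowing search window) instead of four any-scans plus cascading conditionals; same cost, alternative structure.
-- ===== PORT A =====
def calculate_water_level (detected_labels : List String) : Int :=
  let detected_lower := detected_labels.map PySem.Str.lower
  let green_visible := detected_lower.any (fun label => PySem.Str.isIn "green" label)
  let yellow_visible := detected_lower.any (fun label => PySem.Str.isIn "yellow" label)
  let orange_visible := detected_lower.any (fun label => PySem.Str.isIn "orange" label)
  let red_visible := detected_lower.any (fun label => PySem.Str.isIn "red" label)
  let water_level : Int := 0
  let water_level := if !green_visible then (25 : Int) else water_level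
  let water_level := if !yellow_visible && !green_visible then (50 : Int) else water_level
  let water_level := if !orange_visible && !yellow_visible && !green_visible then (75 : Int) else water_level
  let water_level := if !red_visible && !orange_visible && !yellow_visible && !green_visible then (100 : Int) else water_level
  water_level

-- ===== PORT B =====
def pvColors : List String := ["green", "yellow", "orange", "red"]

-- inner loop: `for i in range(best): if colors[i] in low: best = i; break`
-- (colors[i] indexing is always in range since i < best ≤ 4; getD is exact here)
def pvInner (low : String) (best : Nat) : Nat :=
  match (List.range best).find? (fun i => PySem.Str.isIn (pvColors.getD i "") low) with
  | some i => i
  | none => best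

def calculate_water_level_alt (detected_labels : List String) : Int :=
  25 * (detected_labels.foldl (fun best label => pvInner (PySem.Str.lower label) best) 4 : Nat)

-- ===== PRECONDITION & SPEC =====
def Spec_calculate_water_level (detected_labels : List String) (out : Int) : Prop := out = calculate_water_level_alt detected_labels
instance (detected_labels : List String) (out : Int) : Decidable (Spec_calculate_water_level detected_labels out) := by unfold Spec_calculate_water_level; infer_instance

-- ===== CLAIM (what is proved, stated in full; the proofs are below) =====
def Claim_equal_calculate_water_level : Prop := ∀ (detected_labels : List String), Dom_calculate_water_level detected_labels → Spec_calculate_water_level detected_labels (calculate_water_level detected_labels)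

-- ===== LEMMAS AND PROOFS =====

set_option maxHeartbeats 1000000

-- the first-present-color index of a single lowered label
def pvM1 (low : String) : Nat :=
  if PySem.Str.isIn "green" low then 0
  else if PySem.Str.isIn "yellow" low then 1
  else if PySem.Str.isIn "orange" low then 2
  else if PySem.Str.isIn "red" low then 3
  else 4

-- the global first-present-color index over a label list
def pvMl : List String → Nat
  | [] => 4
  | l :: ls => min (pvM1 (PySem.Str.lower l)) (pvMl ls)

-- "some label contains s after lowering"
def pvAny (s : String) (ls : List String) : Bool :=
  ls.any (fun l => PySem.Str.isIn s (PySem.Str.lower l))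

theorem pvAny_nil (s : String) : pvAny s [] = false := rfl

theorem pvAny_cons (s : String) (l : String) (ls : List String) :
    pvAny s (l :: ls) = (PySem.Str.isIn s (PySem.Str.lower l) || pvAny s ls) := rfl

theorem pvAny_eq (s : String) (ls : List String) :
    (ls.map PySem.Str.lower).any (fun l => PySem.Str.isIn s l) = pvAny s ls := by
  simp [pvAny, List.any_map, Function.comp_def, PySem.Str.isIn, PySem.Str.toList_lower]

theorem pvInner_min (low : String) (b : Nat) (hb : b ≤ 4) :
    pvInner low b = min b (pvM1 low) := by
  interval_cases b <;>
  cases h0 : PySem.Str.isIn "green" low <;>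
  cases h1 : PySem.Str.isIn "yellow" low <;>
  cases h2 : PySem.Str.isIn "orange" low <;>
  cases h3 : PySem.Str.isIn "red" low <;>
  simp only [pvInner, pvM1, pvColors, List.find?,
    show List.range 0 = [] from rfl, show List.range 1 = [0] from rfl,
    show List.range 2 = [0, 1] from rfl, show List.range 3 = [0, 1, 2] from rfl,
    show List.range 4 = [0, 1, 2, 3] from rfl,
    List.getD_cons_zero, List.getD_cons_succ, h0, h1, h2, h3] <;>
  rfl

theorem pvFoldl_min (ls : List String) : ∀ b : Nat, b ≤ 4 →
    ls.foldl (fun best label => pvInner (PySem.Str.lower label) best) b = min b (pvMl ls) := by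
  induction ls with
  | nil => intro b hb; simp [pvMl]; omega
  | cons l ls ih =>
    intro b hb
    have h1 : pvInner (PySem.Str.lower l) b = min b (pvM1 (PySem.Str.lower l)) :=
      pvInner_min _ b hb
    have h2 : min b (pvM1 (PySem.Str.lower l)) ≤ 4 := le_trans (Nat.min_le_left _ _) hb
    simp only [List.foldl_cons, h1, ih _ h2, pvMl]
    omega

theorem pvMl_char (ls : List String) :
    pvMl ls =
      if pvAny "green" ls then 0
      else if pvAny "yellow" ls then 1
      else if pvAny "orange" ls then 2
      else if pvAny "red" ls then 3
      else 4 := by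
  induction ls with
  | nil => simp [pvMl, pvAny_nil]
  | cons l ls ih =>
    rw [pvMl, ih, pvM1]
    cases h0 : PySem.Str.isIn "green" (PySem.Str.lower l) <;>
    cases h1 : PySem.Str.isIn "yellow" (PySem.Str.lower l) <;>
    cases h2 : PySem.Str.isIn "orange" (PySem.Str.lower l) <;>
    cases h3 : PySem.Str.isIn "red" (PySem.Str.lower l) <;>
    cases h4 : pvAny "green" ls <;>
    cases h5 : pvAny "yellow" ls <;>
    cases h6 : pvAny "orange" ls <;>
    cases h7 : pvAny "red" ls <;>
    simp only [pvAny_cons, h0, h1, h2, h3, h4, h5, h6, h7,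
      Bool.false_or, Bool.true_or, Bool.or_false, Bool.or_true,
      if_true, if_false, Bool.false_eq_true] <;>
    rfl

-- ===== VERDICT (by name: the statement is the Claim_ definition above) =====
theorem calculate_water_level_spec : Claim_equal_calculate_water_level := by
  intro ls _
  unfold Spec_calculate_water_level calculate_water_level calculate_water_level_alt
  rw [pvFoldl_min ls 4 (le_refl 4), pvMl_char ls]
  simp only [pvAny_eq]
  cases h4 : pvAny "green" ls <;>
  cases h5 : pvAny "yellow" ls <;>
  cases h6 : pvAny "orange" ls <;>
  cases h7 : pvAny "red" ls <;>
  simp only [h4, h5, h6, h7, Bool.not_true, Bool.not_false,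
    Bool.true_and, Bool.and_true, Bool.false_and, Bool.and_false,
    if_true, if_false, Bool.false_eq_true] <;>
  rfl
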